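-- pv_equiv track=rewrite | github.com/Neojadeveloper/AoC | day12/solution.py | calculate_shape_corners
-- ===== SOURCE A (Python) =====
-- def calculate_shape_corners(points):
--     points_set = set(
--         points
--     )  # Qidirishni tezlashtirish uchun nuqtalarni to'plamga aylantiramiz
--     corners = 0
--
--     # Qo'shni yo'nalishlar: yuqori, o'ng, past, chap
--     directions = [(-1, 0), (1, 0), (0, -1), (0, 1)]
--
--     for x, y in points:
--         # Har bir nuqtaning qo'shnilarini topamiz
--         neighbors = [(x + dx, y + dy) for dx, dy in directions]
--         connected_neighbors = [n for n in neighbors if n in points_set]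
--
--         # Agar qo'shnilarning soni 2 dan kam yoki shakl yo'nalishi o'zgarsa, burchak deb hisoblaymiz
--         if (
--             len(connected_neighbors) != 2
--         ):  # 2 dan ko'p yoki kam qo'shni bo'lsa, burchak bo'ladi
--             corners += 1
--
--     return corners
-- ===== SOURCE B (Python) =====
-- def calculate_shape_corners(points):
--     pts = set(points)
--     # Build a degree table: each undirected edge is discovered once, by looking
--     # only right and down from each distinct point, and bumps both endpoints.
--     deg = {}
--     for (x, y) in pts:
--         for n in ((x + 1, y), (x, y + 1)):
--             if n in pts:
--                 deg[(x, y)] = deg.get((x, y), 0) + 1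
--                 deg[n] = deg.get(n, 0) + 1
--     # Count over the ORIGINAL list (duplicates counted as in the input).
--     corners = 0
--     for p in points:
--         if deg.get(p, 0) != 2:
--             corners += 1
--     return corners
-- ===== Notes on version B (the rewrite author's own statement) =====
-- stated objective: alternative
-- what changed: Replaces A's fused per-point four-neighbor membership scan with two passes of a different shape: first a degree table is built over the deduplicated point set by discovering each undirected edge exactly once (only right/down probes, incrementing both endpoints), then corners are counted over the original list as points whose tabled degree is not 2.
import Mathlib
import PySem

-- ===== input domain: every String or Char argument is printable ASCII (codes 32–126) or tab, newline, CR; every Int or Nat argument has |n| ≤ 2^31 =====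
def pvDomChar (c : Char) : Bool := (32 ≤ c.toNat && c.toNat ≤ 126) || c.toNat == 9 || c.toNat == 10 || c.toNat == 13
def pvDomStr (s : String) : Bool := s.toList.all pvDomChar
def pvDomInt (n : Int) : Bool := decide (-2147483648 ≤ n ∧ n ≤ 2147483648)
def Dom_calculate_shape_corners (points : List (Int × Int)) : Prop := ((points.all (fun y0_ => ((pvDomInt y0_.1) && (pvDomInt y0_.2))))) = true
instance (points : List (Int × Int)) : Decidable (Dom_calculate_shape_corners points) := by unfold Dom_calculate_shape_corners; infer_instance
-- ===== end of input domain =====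

-- B replaces A's fused per-point four-neighbor scan with an edge-once degree table
-- over the deduplicated set followed by a counting pass over the original list
-- (objective: alternative decomposition, same asymptotic cost).


-- ===== PORT A =====
def calculate_shape_corners (points : List (Int × Int)) : Int :=
  let points_set := PySem.Set.ofList points
  let directions : List (Int × Int) := [(-1, 0), (1, 0), (0, -1), (0, 1)]
  points.foldl (fun corners p =>
    let neighbors := directions.map (fun d => (p.1 + d.1, p.2 + d.2))
    let connected_neighbors := neighbors.filter (fun n => PySem.Set.contains points_set n)
    if connected_neighbors.length ≠ 2 then corners + 1 else corners) 0

-- ===== PORT B =====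
def calculate_shape_corners_alt (points : List (Int × Int)) : Int :=
  let pts := PySem.Set.ofList points
  -- degree table: each undirected edge found once (right/down probes), both endpoints bumped
  let deg : PySem.Dict (Int × Int) Int :=
    pts.foldl (fun d u =>
      [(u.1 + 1, u.2), (u.1, u.2 + 1)].foldl (fun d n =>
        if PySem.Set.contains pts n then
          PySem.Dict.modify (PySem.Dict.modify d u 0 (· + 1)) n 0 (· + 1)
        else d) d)
      PySem.Dict.empty
  points.foldl (fun corners p =>
    if PySem.Dict.getD deg p 0 ≠ 2 then corners + 1 else corners) 0

-- ===== PRECONDITION & SPEC =====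
def Spec_calculate_shape_corners (points : List (Int × Int)) (out : Int) : Prop := out = calculate_shape_corners_alt points
instance (points : List (Int × Int)) (out : Int) : Decidable (Spec_calculate_shape_corners points out) := by unfold Spec_calculate_shape_corners; infer_instance

-- ===== CLAIM (what is proved, stated in full; the proofs are below) =====
def Claim_equal_calculate_shape_corners : Prop := ∀ (points : List (Int × Int)), Dom_calculate_shape_corners points → Spec_calculate_shape_corners points (calculate_shape_corners points)

-- ===== LEMMAS AND PROOFS =====

-- contribution of one set element u to the degree of p in B's table build
def pvContrib (S : List (Int × Int)) (p u : Int × Int) : Int :=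
  (if PySem.Set.contains S (u.1 + 1, u.2) then
      (if p = u then 1 else 0) + (if p = (u.1 + 1, u.2) then 1 else 0) else 0)
  + (if PySem.Set.contains S (u.1, u.2 + 1) then
      (if p = u then 1 else 0) + (if p = (u.1, u.2 + 1) then 1 else 0) else 0)

theorem pvBump (d : PySem.Dict (Int × Int) Int) (k p : Int × Int) :
    PySem.Dict.getD (PySem.Dict.modify d k 0 (· + 1)) p 0
      = PySem.Dict.getD d p 0 + (if p = k then 1 else 0) := by
  rw [PySem.Dict.getD_modify]
  split_ifs with h
  · rw [h]
  · ring

theorem pvBuild (S : List (Int × Int)) :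
    ∀ (l : List (Int × Int)) (d : PySem.Dict (Int × Int) Int) (p : Int × Int),
    PySem.Dict.getD
      (l.foldl (fun d u =>
        [(u.1 + 1, u.2), (u.1, u.2 + 1)].foldl (fun d n =>
          if PySem.Set.contains S n then
            PySem.Dict.modify (PySem.Dict.modify d u 0 (· + 1)) n 0 (· + 1)
          else d) d) d) p 0
    = PySem.Dict.getD d p 0 + (l.map (pvContrib S p)).sum := by
  intro l
  induction l with
  | nil => intro d p; simp
  | cons u t ih =>
    intro d p
    rw [List.foldl_cons, ih, List.map_cons, List.sum_cons]
    have hstep : ∀ (d : PySem.Dict (Int × Int) Int),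
        PySem.Dict.getD
          ([(u.1 + 1, u.2), (u.1, u.2 + 1)].foldl (fun d n =>
            if PySem.Set.contains S n then
              PySem.Dict.modify (PySem.Dict.modify d u 0 (· + 1)) n 0 (· + 1)
            else d) d) p 0
        = PySem.Dict.getD d p 0 + pvContrib S p u := by
      intro d
      simp only [List.foldl_cons, List.foldl_nil, pvContrib]
      split_ifs <;>
        first
          | (rw [pvBump, pvBump, pvBump, pvBump]; split_ifs <;> omega)
          | (rw [pvBump, pvBump]; split_ifs <;> omega)
          | omega
    rw [hstep]; ring

theorem pvIteSplit (A B C : Prop) [Decidable A] [Decidable B] [Decidable C] :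
    (if A then ((if B then (1:Int) else 0) + (if C then 1 else 0)) else 0)
    = (if A ∧ B then 1 else 0) + (if A ∧ C then 1 else 0) := by
  split_ifs <;> first | omega | tauto

theorem pvSumEq (a : Int × Int) (Q : Prop) [Decidable Q] :
    ∀ l : List (Int × Int),
    (l.map (fun u => if u = a ∧ Q then (1:Int) else 0)).sum
      = if Q then (l.count a : Int) else 0 := by
  intro l
  induction l with
  | nil => simp
  | cons x t ih =>
    simp only [List.map_cons, List.sum_cons, ih, List.count_cons]
    push_cast
    by_cases hx : x = a
    · split_ifs <;> simp_all <;> omega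
    · split_ifs <;> simp_all <;> omega

theorem pvCountNodup (l : List (Int × Int)) (hnd : l.Nodup) (a : Int × Int) :
    (l.count a : Int) = if a ∈ l then 1 else 0 := by
  by_cases h : a ∈ l
  · rw [if_pos h, List.count_eq_one_of_mem hnd h]; rfl
  · rw [if_neg h, List.count_eq_zero_of_not_mem h]; rfl

theorem pvSumContrib (S : List (Int × Int)) (hnd : S.Nodup) (p : Int × Int) (hp : p ∈ S) :
    ((S.map (pvContrib S p)).sum) =
      (if PySem.Set.contains S (p.1 + 1, p.2) then 1 else 0)
    + (if PySem.Set.contains S (p.1 - 1, p.2) then 1 else 0)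
    + (if PySem.Set.contains S (p.1, p.2 + 1) then 1 else 0)
    + (if PySem.Set.contains S (p.1, p.2 - 1) then 1 else 0) := by
  have hcp : PySem.Set.contains S p = true := (PySem.Set.contains_iff S p).mpr hp
  have hsplit : ∀ u, pvContrib S p u =
      (if u = p ∧ PySem.Set.contains S (p.1 + 1, p.2) = true then (1:Int) else 0)
    + (if u = (p.1 - 1, p.2) ∧ PySem.Set.contains S p = true then 1 else 0)
    + (if u = p ∧ PySem.Set.contains S (p.1, p.2 + 1) = true then 1 else 0)
    + (if u = (p.1, p.2 - 1) ∧ PySem.Set.contains S p = true then 1 else 0) := by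
    intro u
    obtain ⟨p1, p2⟩ := p
    obtain ⟨u1, u2⟩ := u
    rw [pvContrib, pvIteSplit, pvIteSplit]
    have e1 : (PySem.Set.contains S (u1 + 1, u2) = true ∧ (p1, p2) = (u1, u2))
        ↔ ((u1, u2) = ((p1, p2) : Int × Int) ∧ PySem.Set.contains S (p1 + 1, p2) = true) := by
      simp only [Prod.mk.injEq]
      constructor
      · rintro ⟨hc, h1, h2⟩; subst h1; subst h2; exact ⟨⟨rfl, rfl⟩, hc⟩
      · rintro ⟨⟨h1, h2⟩, hc⟩; subst h1; subst h2; exact ⟨hc, rfl, rfl⟩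
    have e2 : (PySem.Set.contains S (u1 + 1, u2) = true ∧ (p1, p2) = ((u1 + 1, u2) : Int × Int))
        ↔ ((u1, u2) = ((p1 - 1, p2) : Int × Int) ∧ PySem.Set.contains S (p1, p2) = true) := by
      simp only [Prod.mk.injEq]
      constructor
      · rintro ⟨hc, h1, h2⟩
        subst h1; subst h2
        exact ⟨⟨by omega, rfl⟩, by simpa using hc⟩
      · rintro ⟨⟨h1, h2⟩, hc⟩
        subst h1; subst h2
        exact ⟨by simpa [show p1 - 1 + 1 = p1 by omega] using hc, by omega, rfl⟩
    have e3 : (PySem.Set.contains S (u1, u2 + 1) = true ∧ (p1, p2) = (u1, u2))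
        ↔ ((u1, u2) = ((p1, p2) : Int × Int) ∧ PySem.Set.contains S (p1, p2 + 1) = true) := by
      simp only [Prod.mk.injEq]
      constructor
      · rintro ⟨hc, h1, h2⟩; subst h1; subst h2; exact ⟨⟨rfl, rfl⟩, hc⟩
      · rintro ⟨⟨h1, h2⟩, hc⟩; subst h1; subst h2; exact ⟨hc, rfl, rfl⟩
    have e4 : (PySem.Set.contains S (u1, u2 + 1) = true ∧ (p1, p2) = ((u1, u2 + 1) : Int × Int))
        ↔ ((u1, u2) = ((p1, p2 - 1) : Int × Int) ∧ PySem.Set.contains S (p1, p2) = true) := by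
      simp only [Prod.mk.injEq]
      constructor
      · rintro ⟨hc, h1, h2⟩
        subst h1; subst h2
        exact ⟨⟨rfl, by omega⟩, by simpa using hc⟩
      · rintro ⟨⟨h1, h2⟩, hc⟩
        subst h1; subst h2
        exact ⟨by simpa [show p2 - 1 + 1 = p2 by omega] using hc, rfl, by omega⟩
    rw [if_congr e1 rfl rfl, if_congr e2 rfl rfl, if_congr e3 rfl rfl, if_congr e4 rfl rfl]
    ring
  calc (S.map (pvContrib S p)).sum
      = (S.map (fun u =>
          (if u = p ∧ PySem.Set.contains S (p.1 + 1, p.2) = true then (1:Int) else 0)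
        + (if u = (p.1 - 1, p.2) ∧ PySem.Set.contains S p = true then 1 else 0)
        + (if u = p ∧ PySem.Set.contains S (p.1, p.2 + 1) = true then 1 else 0)
        + (if u = (p.1, p.2 - 1) ∧ PySem.Set.contains S p = true then 1 else 0))).sum := by
        exact congrArg List.sum (List.map_congr_left (fun u _ => hsplit u))
    _ = _ := by
        rw [PySem.List.sum_map_add_int, PySem.List.sum_map_add_int, PySem.List.sum_map_add_int,
            pvSumEq, pvSumEq, pvSumEq, pvSumEq]
        rw [pvCountNodup S hnd, pvCountNodup S hnd, pvCountNodup S hnd]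
        simp only [hcp, if_pos hp]
        have hl : ((p.1 - 1, p.2) ∈ S) ↔ PySem.Set.contains S (p.1 - 1, p.2) = true :=
          (PySem.Set.contains_iff _ _).symm
        have hu : ((p.1, p.2 - 1) ∈ S) ↔ PySem.Set.contains S (p.1, p.2 - 1) = true :=
          (PySem.Set.contains_iff _ _).symm
        split_ifs <;> simp_all <;> omega

-- A's connected-neighbor count as four indicators
theorem pvLenA (S : List (Int × Int)) (p : Int × Int) :
    ((([( -1, 0), (1, 0), (0, -1), (0, 1)] : List (Int × Int)).map
        (fun d => (p.1 + d.1, p.2 + d.2))).filter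
        (fun n => PySem.Set.contains S n)).length
    = (if PySem.Set.contains S (p.1 - 1, p.2) then 1 else 0)
    + (if PySem.Set.contains S (p.1 + 1, p.2) then 1 else 0)
    + (if PySem.Set.contains S (p.1, p.2 - 1) then 1 else 0)
    + (if PySem.Set.contains S (p.1, p.2 + 1) then 1 else 0) := by
  simp only [List.map_cons, List.map_nil, List.filter_cons, List.filter_nil,
    ← sub_eq_add_neg, add_zero]
  split_ifs <;> simp

theorem pvFoldCongr {α : Type} (c1 c2 : α → Prop) [DecidablePred c1] [DecidablePred c2] :
    ∀ (l : List α) (a : Int), (∀ x ∈ l, c1 x ↔ c2 x) →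
    l.foldl (fun c x => if c1 x then c + 1 else c) a
      = l.foldl (fun c x => if c2 x then c + 1 else c) a := by
  intro l
  induction l with
  | nil => intro a _; rfl
  | cons x t ih =>
    intro a h
    simp only [List.foldl_cons]
    have hx := h x (List.mem_cons_self)
    by_cases hc : c1 x
    · rw [if_pos hc, if_pos (hx.mp hc)]; exact ih _ (fun y hy => h y (List.mem_cons_of_mem _ hy))
    · rw [if_neg hc, if_neg (fun h2 => hc (hx.mpr h2))]
      exact ih _ (fun y hy => h y (List.mem_cons_of_mem _ hy))

-- ===== VERDICT (by name: the statement is the Claim_ definition above) =====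
theorem calculate_shape_corners_spec : Claim_equal_calculate_shape_corners := by
  intro points _
  unfold Spec_calculate_shape_corners calculate_shape_corners calculate_shape_corners_alt
  apply pvFoldCongr
  intro p hp
  have hS : p ∈ PySem.Set.ofList points := by
    rw [PySem.Set.mem_ofList]; exact hp
  rw [pvBuild, pvSumContrib _ (PySem.Set.nodup_ofList points) _ hS, pvLenA,
      PySem.Dict.getD_empty]
  constructor <;> intro h <;> intro hEq <;> apply h <;>
    split_ifs at * <;> omega
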